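-- pv_equiv track=rewrite | github.com/tnqkr3753/algorithm | src/baekjoon_python/Baek1105.py | process
-- ===== SOURCE A (Python) =====
-- def process(l : str, r : str) -> int:
--     min_count = 0
--     if len(l) == len(r):
--         for idx in range(0, len(r)):
--             if l[idx] == r[idx] :
--                 if l[idx] == '8':
--                     min_count += 1
--             else : break
--     return min_count
-- ===== SOURCE B (Python) =====
-- def process(l: str, r: str) -> int:
--     # Right-to-left scan: walk the zipped pairs backwards; a mismatch resets the
--     # tally to 0, a match adds 1 if the char is '8'. The final value is the count
--     # of '8's in the common prefix, with no break and no prefix slice.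
--     if len(l) != len(r):
--         return 0
--     acc = 0
--     for a, b in reversed(list(zip(l, r))):
--         acc = acc + (a == '8') if a == b else 0
--     return acc
-- ===== Notes on version B (the rewrite author's own statement) =====
-- stated objective: alternative
-- what changed: A walks left-to-right with an early break, tallying as it goes; B traverses the zipped characters right-to-left with no break: a mismatch resets the running tally to 0, a matching '8' increments it, so the answer emerges at the left end.
import Mathlib
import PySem

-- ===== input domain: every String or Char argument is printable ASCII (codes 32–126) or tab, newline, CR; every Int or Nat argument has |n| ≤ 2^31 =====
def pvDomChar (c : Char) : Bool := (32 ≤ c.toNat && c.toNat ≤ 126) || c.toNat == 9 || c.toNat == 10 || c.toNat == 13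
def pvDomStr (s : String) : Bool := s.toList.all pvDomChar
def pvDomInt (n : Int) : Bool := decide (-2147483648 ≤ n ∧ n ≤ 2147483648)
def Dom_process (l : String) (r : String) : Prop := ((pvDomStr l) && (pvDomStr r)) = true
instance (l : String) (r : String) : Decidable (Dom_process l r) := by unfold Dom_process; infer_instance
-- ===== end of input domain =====

-- B replaces A's left-to-right scan-with-break by a right-to-left pass over the zipped
-- characters whose tally resets on mismatch; a genuinely different traversal, same O(n) cost.


-- ===== PORT A =====
-- the 'for idx in range(0, len(r))' loop with its break, carried as index recursion;
-- l[idx]/r[idx] are always in range here since the loop only runs under the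
-- len(l) == len(r) guard, so the 'none' arm is unreachable
def processLoopA (lc rc : List Char) (idx : Nat) (acc : Int) : Int :=
  if idx < rc.length then
    match PySem.List.pyGet? lc (idx : Int), PySem.List.pyGet? rc (idx : Int) with
    | some c, some d =>
        if c = d then processLoopA lc rc (idx + 1) (if c = '8' then acc + 1 else acc)
        else acc
    | _, _ => acc
  else acc
termination_by rc.length - idx

def process (l : String) (r : String) : Int :=
  if l.toList.length = r.toList.length then processLoopA l.toList r.toList 0 0 else 0

-- ===== PORT B =====
-- 'for a, b in reversed(list(zip(l, r))): acc = acc + (a == '8') if a == b else 0'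
def process_alt (l : String) (r : String) : Int :=
  if l.toList.length ≠ r.toList.length then 0
  else
    ((l.toList.zip r.toList).reverse).foldl
      (fun acc p => if p.1 = p.2 then acc + (if p.1 = '8' then 1 else 0) else 0) 0

-- ===== PRECONDITION & SPEC =====
def Spec_process (l : String) (r : String) (out : Int) : Prop := out = process_alt l r
instance (l : String) (r : String) (out : Int) : Decidable (Spec_process l r out) := by unfold Spec_process; infer_instance

-- ===== CLAIM (what is proved, stated in full; the proofs are below) =====
def Claim_equal_process : Prop := ∀ (l : String) (r : String), Dom_process l r → Spec_process l r (process l r)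

-- ===== LEMMAS AND PROOFS =====

-- A's fused loop from idx equals acc plus the right-fold of B's step over the
-- remaining zipped pairs (drop idx), whose reset-on-mismatch discards everything
-- past the first mismatch exactly as A's break does
theorem loopA_eq_foldr (lc rc : List Char) (hlen : lc.length = rc.length)
    (idx : Nat) (acc : Int) :
    processLoopA lc rc idx acc =
      acc + ((lc.zip rc).drop idx).foldr
        (fun p rest => if p.1 = p.2 then rest + (if p.1 = '8' then 1 else 0) else 0) 0 := by
  unfold processLoopA
  by_cases hidx : idx < rc.length
  · have hidx' : idx < lc.length := by omega
    have hz : idx < (lc.zip rc).length := by simp [List.length_zip]; omega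
    rw [if_pos hidx, PySem.List.pyGet?_natCast, PySem.List.pyGet?_natCast,
        List.getElem?_eq_getElem hidx', List.getElem?_eq_getElem hidx,
        List.drop_eq_getElem_cons hz]
    simp only [List.getElem_zip, List.foldr_cons]
    by_cases heq : lc[idx] = rc[idx]
    · rw [if_pos heq, if_pos heq, loopA_eq_foldr lc rc hlen (idx + 1)]
      split <;> ring
    · rw [if_neg heq, if_neg heq]
      ring
  · rw [if_neg hidx, List.drop_eq_nil_of_le (by simp [List.length_zip]; omega)]
    simp
termination_by rc.length - idx

-- ===== VERDICT (by name: the statement is the Claim_ definition above) =====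
theorem process_spec : Claim_equal_process := by
  intro l r _
  unfold Spec_process process process_alt
  by_cases h : l.toList.length = r.toList.length
  · rw [if_pos h, if_neg (by omega), List.foldl_reverse,
      loopA_eq_foldr l.toList r.toList h 0 0]
    simp
  · rw [if_neg h, if_pos h]
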